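-- pv_equiv track=rewrite | github.com/adamdayan/cryptopals | set1/attempt_ch_6.py | transpose_chunks
-- ===== SOURCE A (Python) =====
-- def transpose_chunks(all_chunks, key_size):
--     all_transposed_chunks = []
--
--     for i in range(key_size):
--         transposed_chunk = []
--         for chunk in all_chunks:
--             if i < len(chunk):
--                 transposed_chunk.append(chunk[i])
--         all_transposed_chunks.append(transposed_chunk)
--
--     return all_transposed_chunks
-- ===== SOURCE B (Python) =====
-- def transpose_chunks(all_chunks, key_size):
--     # Single pass over all_chunks: maintain all key_size column buckets at once;
--     # zip truncates each chunk at min(len(chunk), key_size), exactly as A's bound check.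
--     columns = [[] for _ in range(key_size)]
--     for chunk in all_chunks:
--         for col, x in zip(columns, chunk):
--             col.append(x)
--     return columns
-- ===== Notes on version B (the rewrite author's own statement) =====
-- stated objective: faster
-- what changed: A rescans the whole chunk list once per column index (key_size passes with a bound check and indexing); B makes a single pass over all_chunks, zipping each chunk against a preallocated list of column buckets and appending in place.
import Mathlib
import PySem

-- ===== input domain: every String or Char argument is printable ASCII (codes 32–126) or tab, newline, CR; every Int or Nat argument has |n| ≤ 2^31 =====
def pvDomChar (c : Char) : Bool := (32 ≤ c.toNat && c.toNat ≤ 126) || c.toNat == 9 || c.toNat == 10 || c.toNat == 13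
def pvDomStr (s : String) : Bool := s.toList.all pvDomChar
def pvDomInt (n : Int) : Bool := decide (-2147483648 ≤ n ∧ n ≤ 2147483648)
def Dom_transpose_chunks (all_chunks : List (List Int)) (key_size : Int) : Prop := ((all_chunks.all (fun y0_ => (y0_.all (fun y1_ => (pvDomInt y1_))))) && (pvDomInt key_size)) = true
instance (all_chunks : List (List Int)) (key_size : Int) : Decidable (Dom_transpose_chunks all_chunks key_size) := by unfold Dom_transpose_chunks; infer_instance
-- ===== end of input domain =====

-- B replaces A's per-column rescans of all_chunks by one pass that appends into all column buckets at once (zip truncation = A's bound check).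

-- ===== PORT A =====
-- literal port: outer loop over range(key_size), inner loop over all_chunks with
-- the bound check; chunk[i] has 0 ≤ i < len(chunk) here, so pyGetD is exact.
def transpose_chunks (all_chunks : List (List Int)) (key_size : Int) : List (List Int) :=
  (PySem.List.pyRange 0 key_size 1).foldl
    (fun acc i =>
      acc ++ [all_chunks.foldl
        (fun tc c => if i < (c.length : Int) then tc ++ [PySem.List.pyGetD c i 0] else tc) []])
    []

-- ===== PORT B =====
-- 'for col, x in zip(columns, chunk): col.append(x)' — append x to each zipped bucket,
-- buckets past the zip unchanged.
def pvZipAppend : List (List Int) → List Int → List (List Int)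
  | cols, [] => cols
  | [], _ => []
  | col :: cols, x :: xs => (col ++ [x]) :: pvZipAppend cols xs

def transpose_chunks_alt (all_chunks : List (List Int)) (key_size : Int) : List (List Int) :=
  all_chunks.foldl pvZipAppend ((PySem.List.pyRange 0 key_size 1).map (fun _ => []))

-- ===== PRECONDITION & SPEC =====
def Spec_transpose_chunks (all_chunks : List (List Int)) (key_size : Int) (out : List (List Int)) : Prop := out = transpose_chunks_alt all_chunks key_size
instance (all_chunks : List (List Int)) (key_size : Int) (out : List (List Int)) : Decidable (Spec_transpose_chunks all_chunks key_size out) := by unfold Spec_transpose_chunks; infer_instance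

-- ===== CLAIM (what is proved, stated in full; the proofs are below) =====
def Claim_equal_transpose_chunks : Prop := ∀ (all_chunks : List (List Int)) (key_size : Int), Dom_transpose_chunks all_chunks key_size → Spec_transpose_chunks all_chunks key_size (transpose_chunks all_chunks key_size)

-- ===== LEMMAS AND PROOFS =====

theorem pvZipAppend_length (cols : List (List Int)) (xs : List Int) :
    (pvZipAppend cols xs).length = cols.length := by
  induction cols generalizing xs with
  | nil => cases xs <;> simp [pvZipAppend]
  | cons c cs ih => cases xs with
    | nil => simp [pvZipAppend]
    | cons x xs => simp [pvZipAppend, ih]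

theorem pvZipAppend_getD (cols : List (List Int)) (xs : List Int) (k : Nat)
    (hk : k < cols.length) :
    (pvZipAppend cols xs).getD k [] =
      if k < xs.length then cols.getD k [] ++ [xs.getD k 0] else cols.getD k [] := by
  induction cols generalizing xs k with
  | nil => simp at hk
  | cons c cs ih =>
    cases xs with
    | nil => simp [pvZipAppend]
    | cons x xs =>
      cases k with
      | zero => simp [pvZipAppend]
      | succ k => simpa [pvZipAppend] using ih xs k (by simpa using hk)

theorem foldl_pvZipAppend_length (chunks : List (List Int)) (cols : List (List Int)) :
    (chunks.foldl pvZipAppend cols).length = cols.length := by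
  induction chunks generalizing cols with
  | nil => rfl
  | cons c cs ih => simp [List.foldl, ih, pvZipAppend_length]

theorem foldl_pvZipAppend_getD (chunks : List (List Int)) (cols : List (List Int)) (k : Nat)
    (hk : k < cols.length) :
    (chunks.foldl pvZipAppend cols).getD k [] =
      cols.getD k [] ++ (chunks.filter (fun c => k < c.length)).map (fun c => c.getD k 0) := by
  induction chunks generalizing cols with
  | nil => simp
  | cons c cs ih =>
    simp only [List.foldl, List.filter]
    rw [ih _ (by simpa [pvZipAppend_length] using hk), pvZipAppend_getD _ _ _ hk]
    by_cases h : k < c.length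
    · simp [h]
    · simp [h]

theorem transpose_chunks_eq_map (all_chunks : List (List Int)) (key_size : Int) :
    transpose_chunks all_chunks key_size =
      (PySem.List.pyRange 0 key_size 1).map
        (fun i => (all_chunks.filter (fun c => decide (i < (c.length : Int)))).map
          (fun c => PySem.List.pyGetD c i 0)) := by
  unfold transpose_chunks
  rw [PySem.List.foldl_append_singleton_eq_map, List.nil_append]
  congr 1
  funext i
  rw [PySem.List.foldl_append_ite]
  simp

-- ===== VERDICT (by name: the statement is the Claim_ definition above) =====
theorem transpose_chunks_spec : Claim_equal_transpose_chunks := by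
  intro all_chunks key_size _
  unfold Spec_transpose_chunks transpose_chunks_alt
  rw [transpose_chunks_eq_map]
  apply List.ext_getElem
  · simp [foldl_pvZipAppend_length]
  · intro k h1 h2
    have hk : k < ((PySem.List.pyRange 0 key_size 1).map (fun _ => ([] : List Int))).length := by
      simpa [foldl_pvZipAppend_length] using h2
    rw [← List.getD_eq_getElem _ [] h1, ← List.getD_eq_getElem _ [] h2,
        foldl_pvZipAppend_getD _ _ _ hk]
    have hkr : k < (PySem.List.pyRange 0 key_size 1).length := by
      simp only [List.length_map] at hk; exact hk
    have hget : (PySem.List.pyRange 0 key_size 1)[k] = (k : Int) := by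
      rw [PySem.List.getElem_pyRange_one 0 key_size k hkr]; ring
    rw [List.getD_eq_getElem _ [] h1]
    simp [hget]
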